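-- pv_equiv track=rewrite | github.com/thegamecracks/thegamebot | bot/commands/ciphers.py | cipherotp
-- ===== SOURCE A (Python) =====
-- CIPHER_OTP_CHARS = 'ABCDEFGHIJKLMNOPQRSTUVWXYZ0123456789'
--
-- def cipherotp(text: str, key: str, decipher: bool):
--     text = text.upper()
--     key = key.upper()
--     cipher_otp_chars_length = len(CIPHER_OTP_CHARS)
--     char_map = tuple(zip(text, key))
--
--     for char, key_char in char_map:
--         if char not in CIPHER_OTP_CHARS:
--             raise ValueError(
--                 f'Invalid character {char!r} given; '
--                 'must be an alphanumeric character')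
--         if key_char not in CIPHER_OTP_CHARS:
--             raise ValueError(
--                 f'Invalid key character {key_char!r} given; '
--                 'must be an alphanumeric character')
--
--     if decipher:
--         return ''.join([
--             CIPHER_OTP_CHARS[
--                 (CIPHER_OTP_CHARS.index(char)
--                  - CIPHER_OTP_CHARS.index(key_char)
--                  ) % cipher_otp_chars_length]
--             for char, key_char in char_map])
--     else:
--         return ''.join([
--             CIPHER_OTP_CHARS[
--                 (CIPHER_OTP_CHARS.index(char)
--                  + CIPHER_OTP_CHARS.index(key_char)
--                  ) % cipher_otp_chars_length]
--             for char, key_char in char_map])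
-- ===== SOURCE B (Python) =====
-- CIPHER_OTP_CHARS = 'ABCDEFGHIJKLMNOPQRSTUVWXYZ0123456789'
--
-- # Tabula recta: precomputed position dict and, for each key character, the
-- # alphabet rotated to start at that character.  Encryption becomes a pure
-- # table lookup (row[position]) and decryption a position search in the row;
-- # no modular arithmetic is done per character.
-- _POS = {c: i for i, c in enumerate(CIPHER_OTP_CHARS)}
-- _ROWS = {c: CIPHER_OTP_CHARS[i:] + CIPHER_OTP_CHARS[:i]
--          for i, c in enumerate(CIPHER_OTP_CHARS)}
--
--
-- def cipherotp(text: str, key: str, decipher: bool):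
--     out = []
--     for char, key_char in zip(text.upper(), key.upper()):
--         i = _POS.get(char)
--         if i is None:
--             raise ValueError(
--                 f'Invalid character {char!r} given; '
--                 'must be an alphanumeric character')
--         row = _ROWS.get(key_char)
--         if row is None:
--             raise ValueError(
--                 f'Invalid key character {key_char!r} given; '
--                 'must be an alphanumeric character')
--         out.append(CIPHER_OTP_CHARS[row.index(char)] if decipher else row[i])
--     return ''.join(out)
-- ===== Notes on version B (the rewrite author's own statement) =====
-- stated objective: alternative
-- what changed: B replaces A's modular-index arithmetic (two linear .index scans plus (i±j)%36 per character, in two branch-specific comprehensions after a separate validation pass) by a precomputed tabula recta: a dict of 36 rotated alphabet rows keyed by key character plus a position dict, so each character is encrypted by a direct row lookup and decrypted by a position search in the row, with no modular arithmetic.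
import Mathlib
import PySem

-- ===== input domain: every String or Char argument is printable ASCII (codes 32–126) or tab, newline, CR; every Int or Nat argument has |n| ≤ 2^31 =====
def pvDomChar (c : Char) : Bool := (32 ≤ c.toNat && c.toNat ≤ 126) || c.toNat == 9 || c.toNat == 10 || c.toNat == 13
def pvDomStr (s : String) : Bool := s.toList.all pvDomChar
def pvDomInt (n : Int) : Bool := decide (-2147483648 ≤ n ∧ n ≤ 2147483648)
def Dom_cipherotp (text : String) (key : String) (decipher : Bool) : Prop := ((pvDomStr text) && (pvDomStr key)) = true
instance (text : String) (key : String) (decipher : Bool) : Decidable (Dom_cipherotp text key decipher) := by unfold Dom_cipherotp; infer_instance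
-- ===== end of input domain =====

-- B replaces A's per-character modular-index arithmetic by a precomputed tabula recta
-- (dict of rotated alphabet rows + position dict): encrypt = row lookup, decrypt =
-- position search in the row (objective: alternative).

-- ===== PORT A =====
def otpChars : List Char := "ABCDEFGHIJKLMNOPQRSTUVWXYZ0123456789".toList

-- literal port of A: uppercase, zip, validation pass, then one of two comprehensions.
-- The `if … then … else ""` guard models A's ValueError path (excluded by Pre_);
-- CIPHER_OTP_CHARS[(…) % 36] is in range, so pyGetD with default ' ' is exact there.
def cipherotp (text : String) (key : String) (decipher : Bool) : String :=
  let t := PySem.Chars.upper text.toList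
  let k := PySem.Chars.upper key.toList
  let n : Int := (otpChars.length : Int)
  let charMap := t.zip k
  if charMap.all (fun p => otpChars.contains p.1 && otpChars.contains p.2) then
    if decipher then
      String.ofList (charMap.map (fun p =>
        PySem.List.pyGetD otpChars
          (PySem.Int.mod ((((PySem.List.index? otpChars p.1).getD 0 : Nat) : Int)
            - (((PySem.List.index? otpChars p.2).getD 0 : Nat) : Int)) n) ' '))
    else
      String.ofList (charMap.map (fun p =>
        PySem.List.pyGetD otpChars
          (PySem.Int.mod ((((PySem.List.index? otpChars p.1).getD 0 : Nat) : Int)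
            + (((PySem.List.index? otpChars p.2).getD 0 : Nat) : Int)) n) ' '))
  else ""  -- ValueError

-- ===== PORT B =====
-- _POS = {c: i for i, c in enumerate(CIPHER_OTP_CHARS)}
def posDict : PySem.Dict Char Int :=
  (PySem.List.enumerate otpChars).foldl (fun d p => d.insert p.2 p.1) PySem.Dict.empty

-- _ROWS = {c: CIPHER_OTP_CHARS[i:] + CIPHER_OTP_CHARS[:i] for i, c in enumerate(...)}
-- (CHARS[i:] / CHARS[:i] with 0 ≤ i ≤ 36 are drop/take — PySem.List.slice_from/slice_to)
def rowsDict : PySem.Dict Char (List Char) :=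
  (PySem.List.enumerate otpChars).foldl
    (fun d p => d.insert p.2
      (PySem.List.slice otpChars (some p.1) none ++ PySem.List.slice otpChars none (some p.1)))
    PySem.Dict.empty

-- B's single loop; altStep is the loop body: `[]` on the none branches models B's
-- ValueError (excluded by Pre_).  row[i] with 0 ≤ i < 36 and CHARS[row.index(char)]
-- are in range, so pyGetD is exact there.
def altStep (d : Bool) (c : Char) (i? : Option Int) (row? : Option (List Char))
    (tail : List Char) : List Char :=
  match i? with
  | none => []  -- ValueError
  | some i =>
    match row? with
    | none => []  -- ValueError
    | some row =>
      (if d then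
        PySem.List.pyGetD otpChars (((PySem.List.index? row c).getD 0 : Nat) : Int) ' '
       else PySem.List.pyGetD row i ' ') :: tail

def altLoop (d : Bool) : List (Char × Char) → List Char
  | [] => []
  | (c, kc) :: rest => altStep d c (posDict.get? c) (rowsDict.get? kc) (altLoop d rest)

def cipherotp_alt (text : String) (key : String) (decipher : Bool) : String :=
  String.ofList (altLoop decipher
    ((PySem.Chars.upper text.toList).zip (PySem.Chars.upper key.toList)))

-- ===== PRECONDITION & SPEC =====
-- Pre_ excludes exactly the inputs on which A raises ValueError: a non-alphanumeric
-- character (after upper-casing) in the zipped prefix of text/key.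
def Pre_cipherotp (text : String) (key : String) (decipher : Bool) : Prop :=
  (((PySem.Chars.upper text.toList).zip (PySem.Chars.upper key.toList)).all
    (fun p => ("ABCDEFGHIJKLMNOPQRSTUVWXYZ0123456789".toList.contains p.1
      && "ABCDEFGHIJKLMNOPQRSTUVWXYZ0123456789".toList.contains p.2))) = true
instance (text : String) (key : String) (decipher : Bool) : Decidable (Pre_cipherotp text key decipher) := by
  unfold Pre_cipherotp; infer_instance

def pvWitness_cipherotp : String × String × Bool := ("Hello7", "k3yKEY", false)

def Spec_cipherotp (text : String) (key : String) (decipher : Bool) (out : String) : Prop := out = cipherotp_alt text key decipher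
instance (text : String) (key : String) (decipher : Bool) (out : String) : Decidable (Spec_cipherotp text key decipher out) := by unfold Spec_cipherotp; infer_instance

-- ===== CLAIM (what is proved, stated in full; the proofs are below) =====
def Claim_equal_cipherotp : Prop := ∀ (text : String) (key : String) (decipher : Bool), Dom_cipherotp text key decipher → Pre_cipherotp text key decipher → Spec_cipherotp text key decipher (cipherotp text key decipher)

-- ===== LEMMAS AND PROOFS =====

-- A's per-character transform (with n already evaluated to 36)
def aChar (decipher : Bool) (p : Char × Char) : Char :=
  if decipher then
    PySem.List.pyGetD otpChars
      (PySem.Int.mod ((((PySem.List.index? otpChars p.1).getD 0 : Nat) : Int)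
        - (((PySem.List.index? otpChars p.2).getD 0 : Nat) : Int)) 36) ' '
  else
    PySem.List.pyGetD otpChars
      (PySem.Int.mod ((((PySem.List.index? otpChars p.1).getD 0 : Nat) : Int)
        + (((PySem.List.index? otpChars p.2).getD 0 : Nat) : Int)) 36) ' '

-- the rotated alphabet row for rotation k (value stored in rowsDict)
def rot (k : Nat) : List Char := otpChars.drop k ++ otpChars.take k

theorem posDict_get (i : Nat) (hi : i ∈ List.range 36) :
    posDict.get? (PySem.List.pyGetD otpChars (i : Int) ' ') = some (i : Int) := by
  revert i; decide

theorem rowsDict_get (i : Nat) (hi : i ∈ List.range 36) :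
    rowsDict.get? (PySem.List.pyGetD otpChars (i : Int) ' ') = some (rot i) := by
  revert i; decide

theorem rot_get (k : Nat) (hk : k ∈ List.range 36) (i : Nat) (hi : i ∈ List.range 36) :
    PySem.List.pyGetD (rot k) (i : Int) ' '
      = PySem.List.pyGetD otpChars (PySem.Int.mod ((i : Int) + (k : Int)) 36) ' ' := by
  revert k i; decide

theorem rot_index (k : Nat) (hk : k ∈ List.range 36) (i : Nat) (hi : i ∈ List.range 36) :
    PySem.List.pyGetD otpChars
        (((PySem.List.index? (rot k) (PySem.List.pyGetD otpChars (i : Int) ' ')).getD 0 : Nat) : Int) ' '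
      = PySem.List.pyGetD otpChars (PySem.Int.mod ((i : Int) - (k : Int)) 36) ' ' := by
  revert k i; decide

-- every alphabet character is otpChars[i] with i = its index, i < 36
theorem mem_char (c : Char) (hc : c ∈ otpChars) :
    ∃ i : Nat, i ∈ List.range 36 ∧ (PySem.List.index? otpChars c).getD 0 = i ∧
      PySem.List.pyGetD otpChars (i : Int) ' ' = c := by
  have hs : (PySem.List.index? otpChars c).isSome := (PySem.List.index?_isSome_iff otpChars c).mpr hc
  obtain ⟨i, hi⟩ := Option.isSome_iff_exists.mp hs
  obtain ⟨hlt, hget, -⟩ := PySem.List.getElem_of_index?_eq_some hi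
  refine ⟨i, ?_, ?_, ?_⟩
  · exact List.mem_range.mpr (by simpa [otpChars] using hlt)
  · simp only [PySem.List.index?_eq_idxOf?] at hi
    simp [hi]
  · rw [PySem.List.pyGetD_natCast, List.getD_eq_getElem?_getD, List.getElem?_eq_getElem hlt]
    exact hget

-- one unfolding step of B's loop agrees with A's transform, for alphabet chars
theorem altLoop_cons_eq (d : Bool) (c kc : Char) (rest : List (Char × Char))
    (hc : c ∈ otpChars) (hk : kc ∈ otpChars) :
    altLoop d ((c, kc) :: rest) = aChar d (c, kc) :: altLoop d rest := by
  obtain ⟨i, hi, hidxc, hgc⟩ := mem_char c hc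
  obtain ⟨k, hkr, hidxk, hgk⟩ := mem_char kc hk
  have hpos : posDict.get? c = some (i : Int) := by rw [← hgc]; exact posDict_get i hi
  have hrow : rowsDict.get? kc = some (rot k) := by rw [← hgk]; exact rowsDict_get k hkr
  rw [altLoop, hpos, hrow, altStep]
  cases d with
  | false =>
    simp only [aChar, Bool.false_eq_true, if_false, hidxc, hidxk]
    rw [rot_get k hkr i hi]
  | true =>
    simp only [aChar, if_true, hidxc, hidxk]
    have h := rot_index k hkr i hi
    rw [hgc] at h
    rw [h]

theorem altLoop_eq_map (d : Bool) (L : List (Char × Char))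
    (hL : ∀ p ∈ L, p.1 ∈ otpChars ∧ p.2 ∈ otpChars) :
    altLoop d L = L.map (aChar d) := by
  induction L with
  | nil => rfl
  | cons p rest ih =>
    obtain ⟨c, kc⟩ := p
    obtain ⟨hc, hk⟩ := hL _ (List.mem_cons_self ..)
    rw [altLoop_cons_eq d c kc rest hc hk, List.map_cons,
      ih (fun q hq => hL q (List.mem_cons_of_mem _ hq))]

theorem contains_alpha_iff (c : Char) :
    ("ABCDEFGHIJKLMNOPQRSTUVWXYZ0123456789".toList.contains c = true) ↔ c ∈ otpChars := by
  simp [otpChars]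

-- ===== VERDICT (by name: the statement is the Claim_ definition above) =====
theorem cipherotp_spec : Claim_equal_cipherotp := by
  intro text key decipher _hdom hpre
  unfold Spec_cipherotp cipherotp cipherotp_alt
  have hall : ∀ p ∈ (PySem.Chars.upper text.toList).zip (PySem.Chars.upper key.toList),
      p.1 ∈ otpChars ∧ p.2 ∈ otpChars := by
    intro p hp
    unfold Pre_cipherotp at hpre
    rw [List.all_eq_true] at hpre
    have := hpre p hp
    rw [Bool.and_eq_true] at this
    exact ⟨(contains_alpha_iff _).1 this.1, (contains_alpha_iff _).1 this.2⟩
  have hguard : (((PySem.Chars.upper text.toList).zip (PySem.Chars.upper key.toList)).all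
      (fun p => otpChars.contains p.1 && otpChars.contains p.2)) = true := by
    rw [List.all_eq_true]
    intro p hp
    have := hall p hp
    simp [this.1, this.2]
  rw [if_pos hguard]
  have hlen : ((otpChars.length : Nat) : Int) = 36 := by decide
  rw [altLoop_eq_map decipher _ hall]
  cases decipher with
  | false =>
    simp only [Bool.false_eq_true, if_false, hlen]
    refine congrArg _ (List.map_congr_left fun p _ => ?_)
    simp [aChar]
  | true =>
    simp only [if_true, hlen]
    refine congrArg _ (List.map_congr_left fun p _ => ?_)
    simp [aChar]
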